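-- pv_equiv track=rewrite | github.com/bjoern-hempel/pytorch-classification | src/dimensionality-reduction-2d.py | get_interbreeding_indexes
-- ===== SOURCE A (Python) =====
-- def get_interbreeding_indexes(index_count, including_same = False, cross = False, deep = 0) -> 'list':
--     """Returns an array combining each with each element.
--
--     Parameters
--     ----------
--     index_count : int
--         The number of elements to interbreed.
--     including_same : bool
--         Combinations are possible.
--     cross : bool
--         The order of the returned indices is significant.
--
--     Returns
--     -------
--     list
--         Returns a list (array) of index combinations.
--
--     """
--     indexes = []
--     correct = 1 if not including_same else 0
--     for i in range(index_count - correct):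
--         index_from = deep
--         index_to = i + deep + correct
--
--         indexes.append([
--             index_from,
--             index_to
--         ])
--
--         if cross and index_from != index_to:
--             indexes.append([
--                 index_to,
--                 index_from
--             ])
--
--     if index_count - correct > 1:
--         indexes += get_interbreeding_indexes(index_count - 1, including_same, cross, deep + 1)
--
--     return indexes
-- ===== SOURCE B (Python) =====
-- def get_interbreeding_indexes(index_count, including_same = False, cross = False, deep = 0) -> 'list':
--     """Iterative version: explicit loop over recursion levels instead of self-recursion."""
--     correct = 0 if including_same else 1
--     out = []
--     for level in range(max(1, index_count - correct)):
--         base = deep + level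
--         for i in range(index_count - level - correct):
--             to = i + base + correct
--             out.append([base, to])
--             if cross and base != to:
--                 out.append([to, base])
--     return out
-- ===== Notes on version B (the rewrite author's own statement) =====
-- stated objective: simpler
-- what changed: Replaced A's self-recursion (each call producing one level and recursing with index_count-1, deep+1) by a single explicit doubly-nested loop over recursion levels that accumulates the same pairs in the same order.
import Mathlib
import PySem

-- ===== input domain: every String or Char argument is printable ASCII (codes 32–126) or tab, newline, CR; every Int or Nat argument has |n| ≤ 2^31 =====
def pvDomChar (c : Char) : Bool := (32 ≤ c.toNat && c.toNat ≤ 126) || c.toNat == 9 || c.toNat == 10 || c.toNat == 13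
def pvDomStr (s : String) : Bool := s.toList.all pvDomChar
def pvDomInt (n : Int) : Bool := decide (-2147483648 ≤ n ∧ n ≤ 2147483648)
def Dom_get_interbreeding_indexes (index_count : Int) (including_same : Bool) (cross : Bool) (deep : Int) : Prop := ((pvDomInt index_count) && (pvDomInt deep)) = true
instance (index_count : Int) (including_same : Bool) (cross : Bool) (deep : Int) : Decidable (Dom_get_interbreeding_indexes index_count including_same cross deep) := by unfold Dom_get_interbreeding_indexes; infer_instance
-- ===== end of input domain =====

-- B replaces A's self-recursion by an explicit loop over recursion levels (same pairs, same order); objective: simpler.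

-- ===== PORT A =====
def get_interbreeding_indexes (index_count : Int) (including_same : Bool) (cross : Bool) (deep : Int) : List (List Int) :=
  let correct : Int := if !including_same then 1 else 0
  let indexes := (PySem.List.pyRange 0 (index_count - correct) 1).foldl
    (fun indexes i =>
      let index_from := deep
      let index_to := i + deep + correct
      let indexes := indexes ++ [[index_from, index_to]]
      if cross && (index_from != index_to) then indexes ++ [[index_to, index_from]] else indexes)
    []
  if index_count - correct > 1 then
    indexes ++ get_interbreeding_indexes (index_count - 1) including_same cross (deep + 1)
  else indexes
termination_by index_count.toNat
decreasing_by
  rename_i h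
  have hc : (0:Int) ≤ correct := by simp only [correct]; split <;> norm_num
  omega

-- ===== PORT B =====
def get_interbreeding_indexes_alt (index_count : Int) (including_same : Bool) (cross : Bool) (deep : Int) : List (List Int) :=
  let correct : Int := if including_same then 0 else 1
  (PySem.List.pyRange 0 (max 1 (index_count - correct)) 1).foldl
    (fun out level =>
      let base := deep + level
      (PySem.List.pyRange 0 (index_count - level - correct) 1).foldl
        (fun out i =>
          let idxto := i + base + correct
          let out := out ++ [[base, idxto]]
          if cross && (base != idxto) then out ++ [[idxto, base]] else out)
        out)
    []

-- ===== CLAIM (what is proved, stated in full; the proofs are below) =====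
def Spec_get_interbreeding_indexes (index_count : Int) (including_same : Bool) (cross : Bool) (deep : Int) (out : List (List Int)) : Prop := out = get_interbreeding_indexes_alt index_count including_same cross deep
instance (index_count : Int) (including_same : Bool) (cross : Bool) (deep : Int) (out : List (List Int)) : Decidable (Spec_get_interbreeding_indexes index_count including_same cross deep out) := by unfold Spec_get_interbreeding_indexes; infer_instance

def Claim_equal_get_interbreeding_indexes : Prop := ∀ (index_count : Int) (including_same : Bool) (cross : Bool) (deep : Int), Dom_get_interbreeding_indexes index_count including_same cross deep → Spec_get_interbreeding_indexes index_count including_same cross deep (get_interbreeding_indexes index_count including_same cross deep)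

-- ===== LEMMAS AND PROOFS =====

/-- `correct` as both programs compute it. -/
def pvCor (including_same : Bool) : Int := if including_same then 0 else 1

/-- The (one or two) pairs emitted for one inner-loop iteration. -/
def pvPairs (cross : Bool) (correct base i : Int) : List (List Int) :=
  [[base, i + base + correct]] ++
    (if cross && (base != i + base + correct) then [[i + base + correct, base]] else [])

/-- one whole inner row (level) as a flatMap -/
def pvRow (cross : Bool) (correct base n : Int) : List (List Int) :=
  (PySem.List.pyRange 0 n 1).flatMap (pvPairs cross correct base)

lemma foldl_pseudo {α β : Type} (g : List α → β → List α) (h : β → List α)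
    (hg : ∀ acc i, g acc i = acc ++ h i) :
    ∀ (l : List β) (acc : List α), l.foldl g acc = acc ++ l.flatMap h := by
  intro l
  induction l with
  | nil => intro acc; simp
  | cons x xs ih => intro acc; simp [List.foldl_cons, hg, ih]

lemma A_eq (ic : Int) (s c : Bool) (deep : Int) :
    get_interbreeding_indexes ic s c deep =
      pvRow c (pvCor s) deep (ic - pvCor s) ++
        (if ic - pvCor s > 1 then get_interbreeding_indexes (ic - 1) s c (deep + 1) else []) := by
  have hc : (if !s then (1 : Int) else 0) = pvCor s := by cases s <;> rfl
  conv_lhs => rw [get_interbreeding_indexes.eq_def]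
  simp only [hc]
  rw [foldl_pseudo _ (pvPairs c (pvCor s) deep)
      (by intro acc i; simp only [pvPairs]; split <;> simp)]
  split <;> simp [pvRow]

lemma B_level (ic : Int) (s c : Bool) (deep : Int) :
    get_interbreeding_indexes_alt ic s c deep =
      (PySem.List.pyRange 0 (max 1 (ic - pvCor s)) 1).flatMap
        (fun L => pvRow c (pvCor s) (deep + L) (ic - L - pvCor s)) := by
  have hc : (if s then (0 : Int) else 1) = pvCor s := by cases s <;> rfl
  conv_lhs => rw [get_interbreeding_indexes_alt]
  simp only [hc]
  rw [foldl_pseudo _ (fun L => pvRow c (pvCor s) (deep + L) (ic - L - pvCor s))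
      (by
        intro acc L
        rw [foldl_pseudo _ (pvPairs c (pvCor s) (deep + L))
            (by intro acc2 i; simp only [pvPairs]; split <;> simp)]
        simp [pvRow])]
  simp

lemma B_eq (ic : Int) (s c : Bool) (deep : Int) :
    get_interbreeding_indexes_alt ic s c deep =
      pvRow c (pvCor s) deep (ic - pvCor s) ++
        (if ic - pvCor s > 1 then get_interbreeding_indexes_alt (ic - 1) s c (deep + 1) else []) := by
  rw [B_level]
  by_cases h : ic - pvCor s > 1
  · rw [if_pos h]
    have hmax : max 1 (ic - pvCor s) = ic - pvCor s := by omega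
    rw [hmax, PySem.List.pyRange_one_cons (by omega : (0:Int) < ic - pvCor s)]
    rw [List.flatMap_cons]
    congr 1
    · norm_num
    · rw [B_level]
      have hmax' : max 1 (ic - 1 - pvCor s) = ic - 1 - pvCor s := by omega
      rw [hmax', PySem.List.pyRange_one, PySem.List.pyRange_one, List.flatMap_map, List.flatMap_map]
      have hnn : ((ic - pvCor s - (0+1)).toNat) = ((ic - 1 - pvCor s - 0).toNat) := by omega
      rw [hnn]
      congr 1
      funext k
      have h1 : ic - ((0:Int) + 1 + k) - pvCor s = ic - 1 - (0 + k) - pvCor s := by ring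
      have h2 : deep + ((0:Int) + 1 + k) = deep + 1 + (0 + k) := by ring
      rw [h1, h2]
  · rw [if_neg h]
    have hmax : max 1 (ic - pvCor s) = 1 := by omega
    rw [hmax, PySem.List.pyRange_one_cons (by omega : (0:Int) < 1)]
    rw [PySem.List.pyRange_one_eq_nil (by omega : (1:Int) ≤ 0 + 1)]
    norm_num

lemma AB_eq : ∀ (n : Nat) (ic : Int), ic.toNat = n → ∀ (s c : Bool) (deep : Int),
    get_interbreeding_indexes ic s c deep = get_interbreeding_indexes_alt ic s c deep := by
  intro n
  induction n using Nat.strong_induction_on with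
  | _ n ih =>
    intro ic hn s c deep
    rw [A_eq, B_eq]
    by_cases h : ic - pvCor s > 1
    · rw [if_pos h, if_pos h]
      congr 1
      have hcor : pvCor s = 0 ∨ pvCor s = 1 := by cases s <;> simp [pvCor]
      exact ih (ic - 1).toNat (by omega) (ic - 1) rfl s c (deep + 1)
    · rw [if_neg h, if_neg h]

-- ===== VERDICT (by name: the statement is the Claim_ definition above) =====
theorem get_interbreeding_indexes_spec : Claim_equal_get_interbreeding_indexes := by
  intro ic s c deep _
  exact AB_eq ic.toNat ic rfl s c deep
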